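-- pv_equiv track=rewrite | github.com/Reason0x6/tie-knee | app/transforms.py | zalgo_text
-- ===== SOURCE A (Python) =====
-- from enum import StrEnum
--
-- class ZalgoDirection(StrEnum):
--     UP = "up"
--     MID = "mid"
--     DOWN = "down"
--     ALL = "all"
--
-- ZALGO_UP = ["\u030d", "\u030e", "\u0304", "\u0305", "\u033f", "\u0311"]
--
-- ZALGO_MID = ["\u0315", "\u031b", "\u0340", "\u0341", "\u0358", "\u0321"]
--
-- ZALGO_DOWN = ["\u0316", "\u0317", "\u0318", "\u0319", "\u0323", "\u0324"]
--
-- def zalgo_text(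
--     text: str,
--     intensity: int = 1,
--     direction: ZalgoDirection = ZalgoDirection.ALL,
-- ) -> str:
--     intensity = max(0, min(intensity, 3))
--     if intensity == 0:
--         return text
--
--     pools: list[list[str]] = []
--     if direction in (ZalgoDirection.UP, ZalgoDirection.ALL):
--         pools.append(ZALGO_UP)
--     if direction in (ZalgoDirection.MID, ZalgoDirection.ALL):
--         pools.append(ZALGO_MID)
--     if direction in (ZalgoDirection.DOWN, ZalgoDirection.ALL):
--         pools.append(ZALGO_DOWN)
--
--     transformed: list[str] = []
--     visible_index = 0
--     for char in text:
--         transformed.append(char)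
--         if char.isspace():
--             continue
--         for pool in pools:
--             for offset in range(intensity):
--                 transformed.append(pool[(visible_index + offset) % len(pool)])
--         visible_index += 1
--
--     return "".join(transformed)
-- ===== SOURCE B (Python) =====
-- ZALGO_UP = ["\u030d", "\u030e", "\u0304", "\u0305", "\u033f", "\u0311"]
-- ZALGO_MID = ["\u0315", "\u031b", "\u0340", "\u0341", "\u0358", "\u0321"]
-- ZALGO_DOWN = ["\u0316", "\u0317", "\u0318", "\u0319", "\u0323", "\u0324"]
--
--
-- def zalgo_text(text, intensity=1, direction="all"):
--     intensity = max(0, min(intensity, 3))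
--     if intensity == 0:
--         return text
--
--     pools = []
--     if direction in ("up", "all"):
--         pools.append(ZALGO_UP)
--     if direction in ("mid", "all"):
--         pools.append(ZALGO_MID)
--     if direction in ("down", "all"):
--         pools.append(ZALGO_DOWN)
--
--     # every pool has length 6, so the decoration depends only on visible_index % 6
--     deco = [
--         "".join(
--             pool[(i + off) % len(pool)]
--             for pool in pools
--             for off in range(intensity)
--         )
--         for i in range(6)
--     ]
--
--     out = []
--     visible = 0
--     for ch in text:
--         out.append(ch)
--         if not ch.isspace():
--             out.append(deco[visible % 6])
--             visible += 1
--     return "".join(out)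
-- ===== Notes on version B (the rewrite author's own statement) =====
-- stated objective: simpler
-- what changed: B precomputes a 6-entry decoration table (the full combining-mark string for each visible_index mod 6) once, so the per-character nested pools/offset loops of A are replaced by a single table lookup in one pass.
import Mathlib
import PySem

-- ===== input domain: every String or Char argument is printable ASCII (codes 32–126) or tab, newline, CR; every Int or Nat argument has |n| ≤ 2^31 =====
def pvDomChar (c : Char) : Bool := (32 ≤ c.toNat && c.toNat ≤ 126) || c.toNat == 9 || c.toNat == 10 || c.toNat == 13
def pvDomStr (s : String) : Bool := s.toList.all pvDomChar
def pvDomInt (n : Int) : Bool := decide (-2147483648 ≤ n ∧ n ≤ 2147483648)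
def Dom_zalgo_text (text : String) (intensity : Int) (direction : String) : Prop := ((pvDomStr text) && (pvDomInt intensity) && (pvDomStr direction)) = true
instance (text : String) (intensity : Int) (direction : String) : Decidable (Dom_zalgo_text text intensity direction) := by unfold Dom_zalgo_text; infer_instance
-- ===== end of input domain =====

-- B replaces A's per-character nested pools/offset loops by a 6-entry decoration table
-- indexed by visible_index % 6, built once before the single pass (objective: simpler).
-- Python's 1-char strings (the input characters and the combining marks) are ported as Char,
-- the accumulating list of strings as List Char and the final "".join as String.mk — exact,
-- since every appended Python string has length 1 (A) resp. is a join of such (B).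

def pvZUP : List Char := ['\u030D', '\u030E', '\u0304', '\u0305', '\u033F', '\u0311']
def pvZMID : List Char := ['\u0315', '\u031B', '\u0340', '\u0341', '\u0358', '\u0321']
def pvZDOWN : List Char := ['\u0316', '\u0317', '\u0318', '\u0319', '\u0323', '\u0324']

-- the pools list, built identically by A and by B (same three membership tests)
def pvPools (direction : String) : List (List Char) :=
  ((if direction == "up" || direction == "all" then [pvZUP] else []) ++
   (if direction == "mid" || direction == "all" then [pvZMID] else [])) ++
  (if direction == "down" || direction == "all" then [pvZDOWN] else [])

-- ===== PORT A =====
-- A's loop body: append the char; if it is not whitespace, append pool[(v+off) % len(pool)]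
-- for every pool and every offset in range(intensity), then increment visible_index
def pvLoopA (pools : List (List Char)) (I : Int) :
    List Char × Int → Char → List Char × Int := fun st ch =>
  let t := st.1 ++ [ch]
  if PySem.Chars.isspace ch then (t, st.2)
  else
    (pools.foldl (fun t pool =>
      (PySem.List.pyRange 0 I 1).foldl (fun t off =>
        t ++ [PySem.List.pyGetD pool (PySem.Int.mod (st.2 + off) (pool.length : Int)) ' ']) t) t,
     st.2 + 1)

def zalgo_text (text : String) (intensity : Int) (direction : String) : String :=
  let I := max 0 (min intensity 3)
  if I = 0 then text
  else
    let pools := pvPools direction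
    String.ofList (text.toList.foldl (pvLoopA pools I) ([], 0)).1

-- ===== PORT B =====
-- B's table entry: "".join(pool[(i+off) % len(pool)] for pool in pools for off in range(intensity))
def pvDeco (pools : List (List Char)) (I : Int) (i : Int) : List Char :=
  pools.flatMap (fun pool =>
    (PySem.List.pyRange 0 I 1).map (fun off =>
      PySem.List.pyGetD pool (PySem.Int.mod (i + off) (pool.length : Int)) ' '))

-- B's loop body: append the char; if not whitespace, append deco[visible % 6] and count
def pvLoopB (deco : List (List Char)) :
    List Char × Int → Char → List Char × Int := fun st ch =>
  let t := st.1 ++ [ch]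
  if !PySem.Chars.isspace ch then
    (t ++ PySem.List.pyGetD deco (PySem.Int.mod st.2 6) [], st.2 + 1)
  else (t, st.2)

def zalgo_text_alt (text : String) (intensity : Int) (direction : String) : String :=
  let I := max 0 (min intensity 3)
  if I = 0 then text
  else
    let pools := pvPools direction
    let deco := (PySem.List.pyRange 0 6 1).map (pvDeco pools I)
    String.ofList (text.toList.foldl (pvLoopB deco) ([], 0)).1

-- ===== PRECONDITION & SPEC =====
def Spec_zalgo_text (text : String) (intensity : Int) (direction : String) (out : String) : Prop := out = zalgo_text_alt text intensity direction
instance (text : String) (intensity : Int) (direction : String) (out : String) : Decidable (Spec_zalgo_text text intensity direction out) := by unfold Spec_zalgo_text; infer_instance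

-- ===== CLAIM (what is proved, stated in full; the proofs are below) =====
def Claim_equal_zalgo_text : Prop := ∀ (text : String) (intensity : Int) (direction : String), Dom_zalgo_text text intensity direction → Spec_zalgo_text text intensity direction (zalgo_text text intensity direction)

-- ===== LEMMAS AND PROOFS =====

-- every pool A or B can select has exactly 6 entries
lemma pvPools_len (direction : String) : ∀ p ∈ pvPools direction, p.length = 6 := by
  intro p hp
  unfold pvPools at hp
  have h : p = pvZUP ∨ p = pvZMID ∨ p = pvZDOWN := by
    split_ifs at hp <;> simp_all
  rcases h with rfl | rfl | rfl <;> rfl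

-- Python's floor-mod by 6 absorbs an inner mod: ((v % 6) + off) % 6 = (v + off) % 6
lemma pvModShift (v off : Int) :
    PySem.Int.mod (PySem.Int.mod v 6 + off) 6 = PySem.Int.mod (v + off) 6 := by
  simp only [PySem.Int.mod_eq_emod_of_pos (b := 6) (by norm_num)]
  omega

-- looking up the table built over range(6) at v % 6 yields the entry at v % 6
lemma pvLookup (f : Int → List Char) (v : Int) :
    PySem.List.pyGetD ((PySem.List.pyRange 0 6 1).map f) (PySem.Int.mod v 6) [] =
      f (PySem.Int.mod v 6) := by
  have h0 : 0 ≤ PySem.Int.mod v 6 := PySem.Int.mod_nonneg (a := v) (b := 6) (by norm_num)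
  have h1 : PySem.Int.mod v 6 < 6 := PySem.Int.mod_lt (a := v) (b := 6) (by norm_num)
  have hr : PySem.List.pyRange 0 6 1 = [0, 1, 2, 3, 4, 5] := by decide
  rw [hr]
  generalize PySem.Int.mod v 6 = r at h0 h1 ⊢
  have h : r = 0 ∨ r = 1 ∨ r = 2 ∨ r = 3 ∨ r = 4 ∨ r = 5 := by omega
  rcases h with rfl | rfl | rfl | rfl | rfl | rfl <;> rfl

-- the table entry at v % 6 equals the decoration A computes at visible_index v
lemma pvDeco_mod (pools : List (List Char)) (h6 : ∀ p ∈ pools, p.length = 6)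
    (I v : Int) : pvDeco pools I (PySem.Int.mod v 6) = pvDeco pools I v := by
  unfold pvDeco
  induction pools with
  | nil => rfl
  | cons p ps ih =>
    simp only [List.flatMap_cons]
    rw [ih (fun q hq => h6 q (List.mem_cons_of_mem _ hq))]
    congr 1
    refine List.map_congr_left (fun off _ => ?_)
    have hp : p.length = 6 := h6 p List.mem_cons_self
    rw [hp]
    norm_num [pvModShift]

-- the two loop bodies agree on every state
lemma pvStep_eq (pools : List (List Char)) (h6 : ∀ p ∈ pools, p.length = 6) (I : Int)
    (st : List Char × Int) (ch : Char) :
    pvLoopA pools I st ch = pvLoopB ((PySem.List.pyRange 0 6 1).map (pvDeco pools I)) st ch := by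
  unfold pvLoopA pvLoopB
  by_cases h : PySem.Chars.isspace ch = true
  · simp [h]
  · simp only [Bool.not_eq_true] at h
    rw [pvLookup, pvDeco_mod pools h6]
    simp only [h, Bool.not_false, if_true, Bool.false_eq_true, if_false]
    refine Prod.ext ?_ rfl
    simp only [PySem.List.foldl_append_singleton_eq_map, PySem.List.foldl_append_eq_flatMap,
      pvDeco, List.append_assoc]

-- ===== VERDICT (by name: the statement is the Claim_ definition above) =====
theorem zalgo_text_spec : Claim_equal_zalgo_text := by
  intro text intensity direction _
  unfold Spec_zalgo_text zalgo_text zalgo_text_alt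
  by_cases h : max 0 (min intensity 3) = 0
  · simp [h]
  · simp only [h, if_false]
    have hstep : pvLoopA (pvPools direction) (max 0 (min intensity 3)) =
        pvLoopB ((PySem.List.pyRange 0 6 1).map
          (pvDeco (pvPools direction) (max 0 (min intensity 3)))) :=
      funext fun st => funext fun ch =>
        pvStep_eq (pvPools direction) (pvPools_len direction) _ st ch
    rw [hstep]
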